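-- pv_equiv track=rewrite | github.com/schroeder-1007/romanian-cfr | gen_ipa.py | latin_to_ipa
-- ===== SOURCE A (Python) =====
-- def latin_to_ipa(lat):
--     #TODO should we apply gn > ŋn here?
--     #TODO intervocalic i > jj and u > w; initial i > j and u > w
--         #actually, seems like vatasescu's latin handles u/w distinction fine
--     #Velarized l in coda seems irrelevant for Romanian outcomes.
--     ipa_dict = {
--         'a' : 'a',
--         'e' : 'e',
--         'i' : 'i',
--         'o' : 'o',
--         'u' : 'u',
--         'y' : 'y',
--         'A' : 'aː',
--         'E' : 'eː',
--         'I' : 'iː',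
--         'O' : 'oː',
--         'U' : 'uː',
--         'Y' : 'yː',
--         'p' : 'p',
--         't' : 't',
--         'c' : 'k',
--         'b' : 'b',
--         'd' : 'd',
--         'g' : 'g',
--         'f' : 'f',
--         's' : 's',
--         'h' : 'h',
--         'm' : 'm',
--         'n' : 'n',
--         'r' : 'r',
--         'l' : 'l',
--         'v' : 'w',
--         'z' : 'z',
--         'K' : 'kʰ',
--         'P' : 'pʰ',
--         'T' : 'tʰ',
--         'x' : 'k s',
--         '1' : 'a e̯',
--         '2' : 'a u̯',
--         '3' : 'o e̯',
--         '4' : 'k w'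
--     }
--     digraphs = {
--         'ae' : '1',
--         'au' : '2',
--         'oe' : '3',
--         'q' : '4',
--         'ch' : 'K',
--         'ph' : 'P',
--         'th' : 'T',
--     }
--
--     #replace digraphs with single chars
--     for key, val in digraphs.items():
--         lat = lat.replace(key,val)
--
--     #construct ipa string
--     ipa = ''
--     for char in lat:
--         ipa += ipa_dict[char] + ' '
--     return ipa
-- ===== SOURCE B (Python) =====
-- def latin_to_ipa(lat):
--     # single char -> IPA, as parallel key string / value list
--     keys = 'aeiouyAEIOUYptcbdgfshmnrlvzKPTx1234'
--     vals = ['a', 'e', 'i', 'o', 'u', 'y',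
--             'a\u02d0', 'e\u02d0', 'i\u02d0', 'o\u02d0', 'u\u02d0', 'y\u02d0',
--             'p', 't', 'k', 'b', 'd', 'g', 'f', 's', 'h', 'm', 'n', 'r', 'l', 'w', 'z',
--             'k\u02b0', 'p\u02b0', 't\u02b0', 'k s',
--             'a e\u032f', 'a u\u032f', 'o e\u032f', 'k w']
--     ipa = dict(zip(keys, vals))
--     # combined lookup: digraph (or 'q') -> IPA of its sentinel
--     digraph_ipa = {
--         'ae': ipa['1'], 'au': ipa['2'], 'oe': ipa['3'],
--         'q': ipa['4'],
--         'ch': ipa['K'], 'ph': ipa['P'], 'th': ipa['T'],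
--     }
--     pieces = []
--     i = 0
--     n = len(lat)
--     while i < n:
--         two = lat[i:i + 2]
--         if two in digraph_ipa:          # greedy 2-char match (or 'q' at the end)
--             pieces.append(digraph_ipa[two])
--             i += 2
--         elif lat[i] in digraph_ipa:     # 'q' mid-string
--             pieces.append(digraph_ipa[lat[i]])
--             i += 1
--         else:
--             pieces.append(ipa[lat[i]])
--             i += 1
--         pieces.append(' ')
--     return ''.join(pieces)
-- ===== Notes on version B (the rewrite author's own statement) =====
-- stated objective: alternative
-- what changed: Replaces the seven sequential whole-string str.replace passes plus a char-by-char += loop with a single left-to-right scan using 2-char lookahead over one combined digraph->IPA table, emitting the final IPA pieces in one pass.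
import Mathlib
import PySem

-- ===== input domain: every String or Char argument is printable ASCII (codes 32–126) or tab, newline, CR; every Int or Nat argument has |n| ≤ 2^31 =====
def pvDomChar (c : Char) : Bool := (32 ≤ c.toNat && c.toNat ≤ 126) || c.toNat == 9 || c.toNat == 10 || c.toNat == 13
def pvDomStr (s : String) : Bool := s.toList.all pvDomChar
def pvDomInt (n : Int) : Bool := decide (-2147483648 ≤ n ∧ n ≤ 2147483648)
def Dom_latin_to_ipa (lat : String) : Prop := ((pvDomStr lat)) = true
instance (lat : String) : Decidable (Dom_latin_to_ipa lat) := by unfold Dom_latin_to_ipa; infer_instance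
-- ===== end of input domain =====

-- B replaces A's seven sequential whole-string replace passes (plus a per-char += loop)
-- by a single left-to-right scan with 2-char lookahead over one combined digraph→IPA table
-- (objective: alternative algorithm, same exact output).

-- ===== PORT A =====
def ipaDictA : PySem.Dict Char (List Char) := PySem.Dict.ofList [
  ('a', "a".toList), ('e', "e".toList), ('i', "i".toList), ('o', "o".toList),
  ('u', "u".toList), ('y', "y".toList),
  ('A', "aː".toList), ('E', "eː".toList), ('I', "iː".toList), ('O', "oː".toList),
  ('U', "uː".toList), ('Y', "yː".toList),
  ('p', "p".toList), ('t', "t".toList), ('c', "k".toList), ('b', "b".toList),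
  ('d', "d".toList), ('g', "g".toList), ('f', "f".toList), ('s', "s".toList),
  ('h', "h".toList), ('m', "m".toList), ('n', "n".toList), ('r', "r".toList),
  ('l', "l".toList), ('v', "w".toList), ('z', "z".toList),
  ('K', "kʰ".toList), ('P', "pʰ".toList), ('T', "tʰ".toList), ('x', "k s".toList),
  ('1', "a e̯".toList), ('2', "a u̯".toList), ('3', "o e̯".toList), ('4', "k w".toList)]

def digraphsA : List (List Char × List Char) := [
  (['a','e'], ['1']), (['a','u'], ['2']), (['o','e'], ['3']), (['q'], ['4']),
  (['c','h'], ['K']), (['p','h'], ['P']), (['t','h'], ['T'])]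

def latin_to_ipa (lat : String) : String :=
  -- replace digraphs with single chars, in the dict's iteration order
  let lat2 := digraphsA.foldl (fun s kv => PySem.Chars.replace s kv.1 kv.2) lat.toList
  -- construct ipa string: ipa += ipa_dict[char] + ' '   (the KeyError case is excluded by Pre_)
  String.ofList (lat2.foldl (fun ipa c => ipa ++ (ipaDictA.getD c [] ++ [' '])) [])

-- ===== PORT B =====
-- single char -> IPA, as parallel key string / value list zipped into a dict
def ipaKeysB : List Char := "aeiouyAEIOUYptcbdgfshmnrlvzKPTx1234".toList
def ipaValsB : List (List Char) := [
  "a".toList, "e".toList, "i".toList, "o".toList, "u".toList, "y".toList,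
  "aː".toList, "eː".toList, "iː".toList, "oː".toList, "uː".toList, "yː".toList,
  "p".toList, "t".toList, "k".toList, "b".toList, "d".toList, "g".toList,
  "f".toList, "s".toList, "h".toList, "m".toList, "n".toList, "r".toList,
  "l".toList, "w".toList, "z".toList,
  "kʰ".toList, "pʰ".toList, "tʰ".toList, "k s".toList,
  "a e̯".toList, "a u̯".toList, "o e̯".toList, "k w".toList]
def ipaDictB : PySem.Dict Char (List Char) := PySem.Dict.ofList (ipaKeysB.zip ipaValsB)

-- combined lookup: digraph (or 'q') -> IPA of its sentinel, exactly as Source B builds it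
def digraphIpaB : PySem.Dict (List Char) (List Char) := PySem.Dict.ofList [
  (['a','e'], ipaDictB.getD '1' []), (['a','u'], ipaDictB.getD '2' []),
  (['o','e'], ipaDictB.getD '3' []), (['q'], ipaDictB.getD '4' []),
  (['c','h'], ipaDictB.getD 'K' []), (['p','h'], ipaDictB.getD 'P' []),
  (['t','h'], ipaDictB.getD 'T' [])]

-- the while loop of Source B: at each position look at the 2-char slice, then the 1-char slice
def scanB : List Char → List Char
  | [] => []
  | [c] =>
    -- two = lat[i:i+2] has length 1 here, so both dict tests look at [c]
    match digraphIpaB.get? [c] with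
    | some v => v ++ [' ']
    | none => ipaDictB.getD c [] ++ [' ']
  | c :: d :: rest =>
    match digraphIpaB.get? [c, d] with
    | some v => v ++ ' ' :: scanB rest
    | none =>
      match digraphIpaB.get? [c] with
      | some v => v ++ ' ' :: scanB (d :: rest)
      | none => ipaDictB.getD c [] ++ ' ' :: scanB (d :: rest)

def latin_to_ipa_alt (lat : String) : String := String.ofList (scanB lat.toList)

-- ===== PRECONDITION & SPEC =====
-- Pre_ excludes exactly the inputs on which A raises KeyError: strings containing a character
-- the substitution tables do not cover (such a character survives every replace pass unchanged).
def Pre_latin_to_ipa (lat : String) : Prop :=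
  lat.toList.all (fun c => ("aeiouyAEIOUYptcbdgfshmnrlvzKPTx1234q".toList).contains c) = true
instance (lat : String) : Decidable (Pre_latin_to_ipa lat) := by unfold Pre_latin_to_ipa; infer_instance

def pvWitness_latin_to_ipa : String := "philosophiaequeauchthonx"

def Spec_latin_to_ipa (lat : String) (out : String) : Prop := out = latin_to_ipa_alt lat
instance (lat : String) (out : String) : Decidable (Spec_latin_to_ipa lat out) := by unfold Spec_latin_to_ipa; infer_instance

-- ===== CLAIM (what is proved, stated in full; the proofs are below) =====
def Claim_equal_latin_to_ipa : Prop := ∀ (lat : String), Dom_latin_to_ipa lat → Pre_latin_to_ipa lat → Spec_latin_to_ipa lat (latin_to_ipa lat)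

-- ===== LEMMAS AND PROOFS =====

-- str.replace as a direct structural recursion (used to reason about Chars.replace)
def rep (old new : List Char) : List Char → List Char
  | [] => []
  | c :: t =>
    if old.isPrefixOf (c :: t) then new ++ rep old new (t.drop (old.length - 1))
    else c :: rep old new t
termination_by s => s.length
decreasing_by
  all_goals simp

theorem rep_nil (old new : List Char) : rep old new [] = [] := by rw [rep]

theorem rep_cons_pos (old new : List Char) (c : Char) (t : List Char)
    (h : old.isPrefixOf (c :: t)) :
    rep old new (c :: t) = new ++ rep old new (t.drop (old.length - 1)) := by
  rw [rep]; simp [h]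

theorem rep_cons_neg (old new : List Char) (c : Char) (t : List Char)
    (h : ¬ old.isPrefixOf (c :: t)) :
    rep old new (c :: t) = c :: rep old new t := by
  rw [rep]; simp [h]

theorem go_eq_rep (old new : List Char) (hold : old ≠ []) :
    ∀ (fuel : Nat) (l acc : List Char), l.length ≤ fuel →
      PySem.Chars.replace.go old new fuel l acc = acc.reverse ++ rep old new l := by
  intro fuel
  induction fuel with
  | zero =>
    intro l acc h
    have : l = [] := by cases l <;> simp_all
    subst this
    simp [PySem.Chars.replace.go, rep_nil]
  | succ n ih =>
    intro l acc h
    cases l with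
    | nil => simp [PySem.Chars.replace.go, rep_nil]
    | cons c t =>
      rw [PySem.Chars.replace.go]
      by_cases hp : old.isPrefixOf (c :: t)
      · simp only [hp, if_true]
        obtain ⟨o, os, rfl⟩ : ∃ o os, old = o :: os := by
          cases old with | nil => exact absurd rfl hold | cons o os => exact ⟨o, os, rfl⟩
        have hlen : (List.drop (o :: os).length (c :: t)).length ≤ n := by
          simp at h ⊢; omega
        rw [ih (List.drop (o :: os).length (c :: t)) (new.reverse ++ acc) hlen]
        rw [rep_cons_pos _ _ _ _ hp]
        simp [List.drop_succ_cons]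
      · simp only [hp]
        have hlen : t.length ≤ n := by simp at h; omega
        rw [ih t (c :: acc) hlen]
        rw [rep_cons_neg _ _ _ _ hp]
        simp

theorem replace_eq_rep (s old new : List Char) (hold : old ≠ []) :
    PySem.Chars.replace s old new = rep old new s := by
  rw [PySem.Chars.replace]
  simp only [List.isEmpty_iff]
  rw [if_neg hold]
  rw [go_eq_rep old new hold s.length s [] le_rfl]
  simp

theorem rep_cons_head_ne (x : Char) (os new : List Char) (c : Char) (t : List Char)
    (h : x ≠ c) : rep (x :: os) new (c :: t) = c :: rep (x :: os) new t := by
  apply rep_cons_neg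
  intro hp
  rw [List.isPrefixOf_iff_prefix, List.cons_prefix_cons] at hp
  exact h hp.1

theorem rep_cons_two_ne (x y : Char) (new : List Char) (c : Char) (t : List Char)
    (h : c ≠ x ∨ t.head? ≠ some y) : rep [x, y] new (c :: t) = c :: rep [x, y] new t := by
  apply rep_cons_neg
  intro hp
  rw [List.isPrefixOf_iff_prefix, List.cons_prefix_cons] at hp
  obtain ⟨hx, hy⟩ := hp
  rcases h with h | h
  · exact h hx.symm
  · cases t with
    | nil => simp at hy
    | cons d u =>
      rw [List.cons_prefix_cons] at hy
      exact h (by simp [hy.1])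

theorem rep_cons_two_pos (x y : Char) (new : List Char) (t : List Char) :
    rep [x, y] new (x :: y :: t) = new ++ rep [x, y] new t := by
  rw [rep_cons_pos]
  · simp
  · simp

theorem rep_q_pos (new : List Char) (q : Char) (t : List Char) :
    rep [q] new (q :: t) = new ++ rep [q] new t := by
  rw [rep_cons_pos]
  · simp
  · simp

theorem head?_rep_single (old : List Char) (σ : Char) (s : List Char) :
    (rep old [σ] s).head? = s.head? ∨ (rep old [σ] s).head? = some σ := by
  cases s with
  | nil => left; rw [rep_nil]
  | cons c t =>
    by_cases h : old.isPrefixOf (c :: t)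
    · right; rw [rep_cons_pos _ _ _ _ h]; rfl
    · left; rw [rep_cons_neg _ _ _ _ h]; rfl

-- the sentinel chars emitted by the replace passes
def pvSentinels : List (Option Char) := [some '1', some '2', some '3', some '4', some 'K', some 'P']

theorem head?_comp (t l : List Char) (old : List Char) (σ : Char)
    (hσ : some σ ∈ pvSentinels)
    (hl : l.head? = t.head? ∨ l.head? ∈ pvSentinels) :
    (rep old [σ] l).head? = t.head? ∨ (rep old [σ] l).head? ∈ pvSentinels := by
  rcases head?_rep_single old σ l with H | H
  · rw [H]; exact hl
  · right; rw [H]; exact hσ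

-- A's seven replace passes, in dict order
def passRA (s : List Char) : List Char :=
  rep ['t','h'] ['T'] (rep ['p','h'] ['P'] (rep ['c','h'] ['K'] (rep ['q'] ['4']
    (rep ['o','e'] ['3'] (rep ['a','u'] ['2'] (rep ['a','e'] ['1'] s))))))

-- what A's output loop emits per char of the replaced string
def emitA (c : Char) : List Char := ipaDictA.getD c [] ++ [' ']

theorem passRA_nil : passRA [] = [] := by simp [passRA, rep_nil]

theorem passRA_ae (u : List Char) : passRA ('a' :: 'e' :: u) = '1' :: passRA u := by
  unfold passRA
  rw [rep_cons_two_pos, List.singleton_append]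
  rw [rep_cons_two_ne 'a' 'u' _ '1' _ (Or.inl (by decide))]
  rw [rep_cons_two_ne 'o' 'e' _ '1' _ (Or.inl (by decide))]
  rw [rep_cons_head_ne 'q' [] _ '1' _ (by decide)]
  rw [rep_cons_two_ne 'c' 'h' _ '1' _ (Or.inl (by decide))]
  rw [rep_cons_two_ne 'p' 'h' _ '1' _ (Or.inl (by decide))]
  rw [rep_cons_two_ne 't' 'h' _ '1' _ (Or.inl (by decide))]

theorem passRA_au (u : List Char) : passRA ('a' :: 'u' :: u) = '2' :: passRA u := by
  unfold passRA
  rw [rep_cons_two_ne 'a' 'e' _ 'a' _ (Or.inr (by simp))]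
  rw [rep_cons_head_ne 'a' ['e'] _ 'u' _ (by decide)]
  rw [rep_cons_two_pos, List.singleton_append]
  rw [rep_cons_two_ne 'o' 'e' _ '2' _ (Or.inl (by decide))]
  rw [rep_cons_head_ne 'q' [] _ '2' _ (by decide)]
  rw [rep_cons_two_ne 'c' 'h' _ '2' _ (Or.inl (by decide))]
  rw [rep_cons_two_ne 'p' 'h' _ '2' _ (Or.inl (by decide))]
  rw [rep_cons_two_ne 't' 'h' _ '2' _ (Or.inl (by decide))]

theorem passRA_oe (u : List Char) : passRA ('o' :: 'e' :: u) = '3' :: passRA u := by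
  unfold passRA
  rw [rep_cons_head_ne 'a' ['e'] _ 'o' _ (by decide)]
  rw [rep_cons_head_ne 'a' ['e'] _ 'e' _ (by decide)]
  rw [rep_cons_head_ne 'a' ['u'] _ 'o' _ (by decide)]
  rw [rep_cons_head_ne 'a' ['u'] _ 'e' _ (by decide)]
  rw [rep_cons_two_pos, List.singleton_append]
  rw [rep_cons_head_ne 'q' [] _ '3' _ (by decide)]
  rw [rep_cons_two_ne 'c' 'h' _ '3' _ (Or.inl (by decide))]
  rw [rep_cons_two_ne 'p' 'h' _ '3' _ (Or.inl (by decide))]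
  rw [rep_cons_two_ne 't' 'h' _ '3' _ (Or.inl (by decide))]

theorem passRA_q (t : List Char) : passRA ('q' :: t) = '4' :: passRA t := by
  unfold passRA
  rw [rep_cons_head_ne 'a' ['e'] _ 'q' _ (by decide)]
  rw [rep_cons_head_ne 'a' ['u'] _ 'q' _ (by decide)]
  rw [rep_cons_head_ne 'o' ['e'] _ 'q' _ (by decide)]
  rw [rep_q_pos, List.singleton_append]
  rw [rep_cons_two_ne 'c' 'h' _ '4' _ (Or.inl (by decide))]
  rw [rep_cons_two_ne 'p' 'h' _ '4' _ (Or.inl (by decide))]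
  rw [rep_cons_two_ne 't' 'h' _ '4' _ (Or.inl (by decide))]

theorem passRA_ch (u : List Char) : passRA ('c' :: 'h' :: u) = 'K' :: passRA u := by
  unfold passRA
  rw [rep_cons_head_ne 'a' ['e'] _ 'c' _ (by decide)]
  rw [rep_cons_head_ne 'a' ['e'] _ 'h' _ (by decide)]
  rw [rep_cons_head_ne 'a' ['u'] _ 'c' _ (by decide)]
  rw [rep_cons_head_ne 'a' ['u'] _ 'h' _ (by decide)]
  rw [rep_cons_head_ne 'o' ['e'] _ 'c' _ (by decide)]
  rw [rep_cons_head_ne 'o' ['e'] _ 'h' _ (by decide)]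
  rw [rep_cons_head_ne 'q' [] _ 'c' _ (by decide)]
  rw [rep_cons_head_ne 'q' [] _ 'h' _ (by decide)]
  rw [rep_cons_two_pos, List.singleton_append]
  rw [rep_cons_two_ne 'p' 'h' _ 'K' _ (Or.inl (by decide))]
  rw [rep_cons_two_ne 't' 'h' _ 'K' _ (Or.inl (by decide))]

theorem passRA_ph (u : List Char) : passRA ('p' :: 'h' :: u) = 'P' :: passRA u := by
  unfold passRA
  rw [rep_cons_head_ne 'a' ['e'] _ 'p' _ (by decide)]
  rw [rep_cons_head_ne 'a' ['e'] _ 'h' _ (by decide)]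
  rw [rep_cons_head_ne 'a' ['u'] _ 'p' _ (by decide)]
  rw [rep_cons_head_ne 'a' ['u'] _ 'h' _ (by decide)]
  rw [rep_cons_head_ne 'o' ['e'] _ 'p' _ (by decide)]
  rw [rep_cons_head_ne 'o' ['e'] _ 'h' _ (by decide)]
  rw [rep_cons_head_ne 'q' [] _ 'p' _ (by decide)]
  rw [rep_cons_head_ne 'q' [] _ 'h' _ (by decide)]
  rw [rep_cons_two_ne 'c' 'h' _ 'p' _ (Or.inl (by decide))]
  rw [rep_cons_head_ne 'c' ['h'] _ 'h' _ (by decide)]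
  rw [rep_cons_two_pos, List.singleton_append]
  rw [rep_cons_two_ne 't' 'h' _ 'P' _ (Or.inl (by decide))]

theorem passRA_th (u : List Char) : passRA ('t' :: 'h' :: u) = 'T' :: passRA u := by
  unfold passRA
  rw [rep_cons_head_ne 'a' ['e'] _ 't' _ (by decide)]
  rw [rep_cons_head_ne 'a' ['e'] _ 'h' _ (by decide)]
  rw [rep_cons_head_ne 'a' ['u'] _ 't' _ (by decide)]
  rw [rep_cons_head_ne 'a' ['u'] _ 'h' _ (by decide)]
  rw [rep_cons_head_ne 'o' ['e'] _ 't' _ (by decide)]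
  rw [rep_cons_head_ne 'o' ['e'] _ 'h' _ (by decide)]
  rw [rep_cons_head_ne 'q' [] _ 't' _ (by decide)]
  rw [rep_cons_head_ne 'q' [] _ 'h' _ (by decide)]
  rw [rep_cons_two_ne 'c' 'h' _ 't' _ (Or.inl (by decide))]
  rw [rep_cons_head_ne 'c' ['h'] _ 'h' _ (by decide)]
  rw [rep_cons_two_ne 'p' 'h' _ 't' _ (Or.inl (by decide))]
  rw [rep_cons_head_ne 'p' ['h'] _ 'h' _ (by decide)]
  rw [rep_cons_two_pos, List.singleton_append]

theorem passRA_other (c : Char) (t : List Char)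
    (h1 : ¬(c = 'a' ∧ t.head? = some 'e')) (h2 : ¬(c = 'a' ∧ t.head? = some 'u'))
    (h3 : ¬(c = 'o' ∧ t.head? = some 'e')) (h4 : c ≠ 'q')
    (h5 : ¬(c = 'c' ∧ t.head? = some 'h')) (h6 : ¬(c = 'p' ∧ t.head? = some 'h'))
    (h7 : ¬(c = 't' ∧ t.head? = some 'h')) :
    passRA (c :: t) = c :: passRA t := by
  have K1 : (rep ['a','e'] ['1'] t).head? = t.head? ∨ (rep ['a','e'] ['1'] t).head? ∈ pvSentinels := by
    rcases head?_rep_single ['a','e'] '1' t with H | H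
    · left; exact H
    · right; rw [H]; decide
  have K2 := head?_comp t _ ['a','u'] '2' (by decide) K1
  have K3 := head?_comp t _ ['o','e'] '3' (by decide) K2
  have K4 := head?_comp t _ ['q'] '4' (by decide) K3
  have K5 := head?_comp t _ ['c','h'] 'K' (by decide) K4
  have K6 := head?_comp t _ ['p','h'] 'P' (by decide) K5
  have hyp : ∀ (l : List Char) (y : Char),
      (l.head? = t.head? ∨ l.head? ∈ pvSentinels) → y ∈ (['e','u','h'] : List Char) →
      t.head? ≠ some y → l.head? ≠ some y := by
    intro l y hl hy hty hc
    rcases hl with H | H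
    · exact hty (H ▸ hc)
    · rw [hc] at H
      simp only [pvSentinels, List.mem_cons, List.not_mem_nil, or_false, Option.some.injEq] at H
      rcases H with rfl | rfl | rfl | rfl | rfl | rfl <;> simp at hy
  unfold passRA
  rw [rep_cons_two_ne 'a' 'e' _ c t (by
    by_cases hc : c = 'a'
    · right; intro hh; exact h1 ⟨hc, hh⟩
    · left; exact hc)]
  rw [rep_cons_two_ne 'a' 'u' _ c _ (by
    by_cases hc : c = 'a'
    · right; exact hyp _ 'u' K1 (by decide) (fun hh => h2 ⟨hc, hh⟩)
    · left; exact hc)]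
  rw [rep_cons_two_ne 'o' 'e' _ c _ (by
    by_cases hc : c = 'o'
    · right; exact hyp _ 'e' K2 (by decide) (fun hh => h3 ⟨hc, hh⟩)
    · left; exact hc)]
  rw [rep_cons_head_ne 'q' [] _ c _ (fun hh => h4 hh.symm)]
  rw [rep_cons_two_ne 'c' 'h' _ c _ (by
    by_cases hc : c = 'c'
    · right; exact hyp _ 'h' K4 (by decide) (fun hh => h5 ⟨hc, hh⟩)
    · left; exact hc)]
  rw [rep_cons_two_ne 'p' 'h' _ c _ (by
    by_cases hc : c = 'p'
    · right; exact hyp _ 'h' K5 (by decide) (fun hh => h6 ⟨hc, hh⟩)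
    · left; exact hc)]
  rw [rep_cons_two_ne 't' 'h' _ c _ (by
    by_cases hc : c = 't'
    · right; exact hyp _ 'h' K6 (by decide) (fun hh => h7 ⟨hc, hh⟩)
    · left; exact hc)]

set_option maxRecDepth 4096 in
theorem digB_two_none (c d : Char) (h1 : ¬(c = 'a' ∧ d = 'e')) (h2 : ¬(c = 'a' ∧ d = 'u'))
    (h3 : ¬(c = 'o' ∧ d = 'e')) (h5 : ¬(c = 'c' ∧ d = 'h')) (h6 : ¬(c = 'p' ∧ d = 'h'))
    (h7 : ¬(c = 't' ∧ d = 'h')) :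
    digraphIpaB.get? [c, d] = none := by
  have hd : digraphIpaB = PySem.Dict.mk [
    (['a','e'], "a e̯".toList), (['a','u'], "a u̯".toList), (['o','e'], "o e̯".toList),
    (['q'], "k w".toList), (['c','h'], "kʰ".toList), (['p','h'], "pʰ".toList),
    (['t','h'], "tʰ".toList)] := by rfl
  rw [hd]
  simp [PySem.Dict.get?_mk_cons, List.cons_beq_cons, beq_iff_eq, @eq_comm Char]
  rw [if_neg h1, if_neg h2, if_neg h3, if_neg h5, if_neg h6, if_neg h7]
  rfl

set_option maxRecDepth 4096 in
theorem digB_one_none (c : Char) (h : c ≠ 'q') : digraphIpaB.get? [c] = none := by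
  have hd : digraphIpaB = PySem.Dict.mk [
    (['a','e'], "a e̯".toList), (['a','u'], "a u̯".toList), (['o','e'], "o e̯".toList),
    (['q'], "k w".toList), (['c','h'], "kʰ".toList), (['p','h'], "pʰ".toList),
    (['t','h'], "tʰ".toList)] := by rfl
  rw [hd]
  simp [PySem.Dict.get?_mk_cons, List.cons_beq_cons, beq_iff_eq, @eq_comm Char]
  rw [if_neg h]
  rfl

theorem scanB_q (t : List Char) : scanB ('q' :: t) = "k w".toList ++ ' ' :: scanB t := by
  cases t with
  | nil => rfl
  | cons d u =>
    simp only [scanB]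
    rw [digB_two_none 'q' d (by simp) (by simp) (by simp) (by simp) (by simp) (by simp)]
    rfl

theorem scanB_other (c : Char) (t : List Char)
    (h1 : ¬(c = 'a' ∧ t.head? = some 'e')) (h2 : ¬(c = 'a' ∧ t.head? = some 'u'))
    (h3 : ¬(c = 'o' ∧ t.head? = some 'e')) (h4 : c ≠ 'q')
    (h5 : ¬(c = 'c' ∧ t.head? = some 'h')) (h6 : ¬(c = 'p' ∧ t.head? = some 'h'))
    (h7 : ¬(c = 't' ∧ t.head? = some 'h')) :
    scanB (c :: t) = ipaDictB.getD c [] ++ ' ' :: scanB t := by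
  cases t with
  | nil =>
    simp only [scanB]
    rw [digB_one_none c h4]
  | cons d u =>
    simp only [scanB]
    rw [digB_two_none c d (by simpa using h1) (by simpa using h2) (by simpa using h3)
      (by simpa using h5) (by simpa using h6) (by simpa using h7)]
    rw [digB_one_none c h4]

set_option maxRecDepth 4096 in
theorem flatMap_passRA_eq_scanB :
    ∀ (n : Nat) (cs : List Char), cs.length ≤ n → (passRA cs).flatMap emitA = scanB cs := by
  intro n
  induction n with
  | zero =>
    intro cs h
    have : cs = [] := by cases cs <;> simp_all
    subst this
    rw [passRA_nil]
    rfl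
  | succ n ih =>
    intro cs hlen
    cases cs with
    | nil => rw [passRA_nil]; rfl
    | cons c t =>
      by_cases H1 : c = 'a' ∧ t.head? = some 'e'
      · obtain ⟨rfl, hh⟩ := H1
        cases t with
        | nil => simp at hh
        | cons d u =>
          obtain rfl : d = 'e' := by simpa using hh
          rw [passRA_ae, List.flatMap_cons, ih u (by simp at hlen; omega)]
          rw [show scanB ('a' :: 'e' :: u) = "a e̯".toList ++ ' ' :: scanB u from rfl]
          rw [show emitA '1' = "a e̯".toList ++ [' '] from rfl]
          simp
      by_cases H2 : c = 'a' ∧ t.head? = some 'u'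
      · obtain ⟨rfl, hh⟩ := H2
        cases t with
        | nil => simp at hh
        | cons d u =>
          obtain rfl : d = 'u' := by simpa using hh
          rw [passRA_au, List.flatMap_cons, ih u (by simp at hlen; omega)]
          rw [show scanB ('a' :: 'u' :: u) = "a u̯".toList ++ ' ' :: scanB u from rfl]
          rw [show emitA '2' = "a u̯".toList ++ [' '] from rfl]
          simp
      by_cases H3 : c = 'o' ∧ t.head? = some 'e'
      · obtain ⟨rfl, hh⟩ := H3
        cases t with
        | nil => simp at hh
        | cons d u =>
          obtain rfl : d = 'e' := by simpa using hh
          rw [passRA_oe, List.flatMap_cons, ih u (by simp at hlen; omega)]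
          rw [show scanB ('o' :: 'e' :: u) = "o e̯".toList ++ ' ' :: scanB u from rfl]
          rw [show emitA '3' = "o e̯".toList ++ [' '] from rfl]
          simp
      by_cases H4 : c = 'q'
      · subst H4
        rw [passRA_q, List.flatMap_cons, ih t (by simp at hlen; omega)]
        rw [scanB_q]
        rw [show emitA '4' = "k w".toList ++ [' '] from rfl]
        simp
      by_cases H5 : c = 'c' ∧ t.head? = some 'h'
      · obtain ⟨rfl, hh⟩ := H5
        cases t with
        | nil => simp at hh
        | cons d u =>
          obtain rfl : d = 'h' := by simpa using hh
          rw [passRA_ch, List.flatMap_cons, ih u (by simp at hlen; omega)]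
          rw [show scanB ('c' :: 'h' :: u) = "kʰ".toList ++ ' ' :: scanB u from rfl]
          rw [show emitA 'K' = "kʰ".toList ++ [' '] from rfl]
          simp
      by_cases H6 : c = 'p' ∧ t.head? = some 'h'
      · obtain ⟨rfl, hh⟩ := H6
        cases t with
        | nil => simp at hh
        | cons d u =>
          obtain rfl : d = 'h' := by simpa using hh
          rw [passRA_ph, List.flatMap_cons, ih u (by simp at hlen; omega)]
          rw [show scanB ('p' :: 'h' :: u) = "pʰ".toList ++ ' ' :: scanB u from rfl]
          rw [show emitA 'P' = "pʰ".toList ++ [' '] from rfl]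
          simp
      by_cases H7 : c = 't' ∧ t.head? = some 'h'
      · obtain ⟨rfl, hh⟩ := H7
        cases t with
        | nil => simp at hh
        | cons d u =>
          obtain rfl : d = 'h' := by simpa using hh
          rw [passRA_th, List.flatMap_cons, ih u (by simp at hlen; omega)]
          rw [show scanB ('t' :: 'h' :: u) = "tʰ".toList ++ ' ' :: scanB u from rfl]
          rw [show emitA 'T' = "tʰ".toList ++ [' '] from rfl]
          simp
      -- no digraph matches at this position: both sides copy one char
      rw [passRA_other c t H1 H2 H3 H4 H5 H6 H7]
      rw [List.flatMap_cons, ih t (by simp at hlen; omega)]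
      rw [scanB_other c t H1 H2 H3 H4 H5 H6 H7]
      rw [show emitA c = ipaDictB.getD c [] ++ [' '] from rfl]
      simp

-- ===== VERDICT (by name: the statement is the Claim_ definition above) =====
theorem latin_to_ipa_spec : Claim_equal_latin_to_ipa := by
  unfold Claim_equal_latin_to_ipa
  intro lat _ _
  unfold Spec_latin_to_ipa latin_to_ipa latin_to_ipa_alt
  simp only [digraphsA, List.foldl_cons, List.foldl_nil]
  rw [replace_eq_rep lat.toList ['a','e'] ['1'] (by decide)]
  rw [replace_eq_rep _ ['a','u'] ['2'] (by decide)]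
  rw [replace_eq_rep _ ['o','e'] ['3'] (by decide)]
  rw [replace_eq_rep _ ['q'] ['4'] (by decide)]
  rw [replace_eq_rep _ ['c','h'] ['K'] (by decide)]
  rw [replace_eq_rep _ ['p','h'] ['P'] (by decide)]
  rw [replace_eq_rep _ ['t','h'] ['T'] (by decide)]
  rw [PySem.List.foldl_append_eq_flatMap (fun c => ipaDictA.getD c [] ++ [' '])]
  have h := flatMap_passRA_eq_scanB lat.toList.length lat.toList le_rfl
  unfold passRA emitA at h
  rw [List.nil_append, h]
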